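-- pv_equiv track=rewrite | github.com/Subekshyeah/SiteX | site_x_ui/scripts/csv2geo.py | find_coord_keys
-- ===== SOURCE A (Python) =====
-- LAT_KEYS = {'lat', 'latitude', 'y', 'lat_dd', 'lat_deg'}
--
-- LON_KEYS = {'lng', 'lon', 'longitude', 'x', 'lng_dd', 'lon_deg'}
--
-- def find_coord_keys(header_row):
--     lower = [h.lower() for h in header_row]
--     lat_key = None
--     lon_key = None
--     for i, h in enumerate(lower):
--         if h in LAT_KEYS and lat_key is None:
--             lat_key = header_row[i]
--         if h in LON_KEYS and lon_key is None:
--             lon_key = header_row[i]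
--     # also try common pairs
--     if lat_key is None:
--         # try 'latitude' substring
--         for i, h in enumerate(lower):
--             if 'lat' in h and lat_key is None:
--                 lat_key = header_row[i]
--     if lon_key is None:
--         for i, h in enumerate(lower):
--             if 'lon' in h or 'lng' in h and lon_key is None:
--                 lon_key = header_row[i]
--     return lat_key, lon_key
-- ===== SOURCE B (Python) =====
-- LAT_KEYS = {'lat', 'latitude', 'y', 'lat_dd', 'lat_deg'}
--
-- LON_KEYS = {'lng', 'lon', 'longitude', 'x', 'lng_dd', 'lon_deg'}
--
-- def find_coord_keys(header_row):
--     # single pass: lowercase each header once, keep exact-match and substring-match candidates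
--     exact_lat = sub_lat = exact_lon = sub_lon = None
--     for h in header_row:
--         l = h.lower()
--         if exact_lat is None and l in LAT_KEYS:
--             exact_lat = h
--         if sub_lat is None and 'lat' in l:
--             sub_lat = h
--         if exact_lon is None and l in LON_KEYS:
--             exact_lon = h
--         if sub_lon is None and ('lon' in l or 'lng' in l):
--             sub_lon = h
--     return (exact_lat if exact_lat is not None else sub_lat,
--             exact_lon if exact_lon is not None else sub_lon)
-- ===== Notes on version B (the rewrite author's own statement) =====
-- stated objective: alternative
-- what changed: A's exact-match pass plus up to two fallback re-scans of the header (re-indexing via enumerate) are replaced by a single pass that lowercases each header once and maintains four first-match candidates (exact lat, 'lat'-substring, exact lon, 'lon'/'lng'-substring), combined after the loop.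
-- intended difference: On headers with no exact longitude key but some header containing 'lon', A's fallback condition `'lon' in h or 'lng' in h and lon_key is None` (an operator-precedence slip) returns the LAST header containing 'lon', while B returns the FIRST header containing 'lon' or 'lng' — the intended first-match fallback, symmetric with A's own latitude fallback. — e.g. on find_coord_keys(["mylon", "lon2"]): A returns (none, some "lon2"), B returns (none, some "mylon")
import Mathlib
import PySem

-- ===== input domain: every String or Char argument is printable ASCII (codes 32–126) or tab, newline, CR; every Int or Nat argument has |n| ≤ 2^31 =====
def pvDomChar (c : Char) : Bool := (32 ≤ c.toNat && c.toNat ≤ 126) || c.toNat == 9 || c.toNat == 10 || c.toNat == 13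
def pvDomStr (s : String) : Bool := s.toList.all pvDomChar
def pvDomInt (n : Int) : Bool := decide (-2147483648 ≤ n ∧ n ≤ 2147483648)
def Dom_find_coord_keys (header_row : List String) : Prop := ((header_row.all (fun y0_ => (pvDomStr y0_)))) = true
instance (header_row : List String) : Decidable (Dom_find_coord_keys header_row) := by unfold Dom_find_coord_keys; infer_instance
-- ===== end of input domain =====

-- B replaces A's exact-match pass plus two fallback re-scans by ONE pass holding four
-- first-match candidates (objective: alternative decomposition, single traversal); on the
-- D_ inputs below B fixes A's operator-precedence slip in the lon fallback.

-- ===== PORT A =====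
def LAT_KEYS : PySem.Set String := PySem.Set.ofList ["lat", "latitude", "y", "lat_dd", "lat_deg"]
def LON_KEYS : PySem.Set String := PySem.Set.ofList ["lng", "lon", "longitude", "x", "lng_dd", "lon_deg"]

def find_coord_keys (header_row : List String) : Option String × Option String :=
  let lower := header_row.map PySem.Str.lower
  let st := (PySem.List.enumerate lower 0).foldl
    (fun (st : Option String × Option String) (p : Int × String) =>
      let lat_key := if LAT_KEYS.contains p.2 && st.1.isNone then PySem.List.pyGet? header_row p.1 else st.1
      let lon_key := if LON_KEYS.contains p.2 && st.2.isNone then PySem.List.pyGet? header_row p.1 else st.2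
      (lat_key, lon_key)) (none, none)
  let lat_key := st.1
  let lon_key := st.2
  let lat_key := if lat_key.isNone then
      (PySem.List.enumerate lower 0).foldl
        (fun (lat : Option String) (p : Int × String) =>
          if PySem.Str.isIn "lat" p.2 && lat.isNone then PySem.List.pyGet? header_row p.1 else lat)
        lat_key
    else lat_key
  let lon_key := if lon_key.isNone then
      (PySem.List.enumerate lower 0).foldl
        (fun (lon : Option String) (p : Int × String) =>
          if PySem.Str.isIn "lon" p.2 || (PySem.Str.isIn "lng" p.2 && lon.isNone) then
            PySem.List.pyGet? header_row p.1 else lon)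
        lon_key
    else lon_key
  (lat_key, lon_key)

-- ===== PORT B =====
def find_coord_keys_alt (header_row : List String) : Option String × Option String :=
  let st := header_row.foldl
    (fun (st : Option String × Option String × Option String × Option String) (h : String) =>
      let l := PySem.Str.lower h
      let eLat := if st.1.isNone && LAT_KEYS.contains l then some h else st.1
      let sLat := if st.2.1.isNone && PySem.Str.isIn "lat" l then some h else st.2.1
      let eLon := if st.2.2.1.isNone && LON_KEYS.contains l then some h else st.2.2.1
      let sLon := if st.2.2.2.isNone && (PySem.Str.isIn "lon" l || PySem.Str.isIn "lng" l) then some h else st.2.2.2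
      (eLat, sLat, eLon, sLon))
    (none, none, none, none)
  ((if st.1.isSome then st.1 else st.2.1),
   (if st.2.2.1.isSome then st.2.2.1 else st.2.2.2))

-- ===== PRECONDITION & SPEC =====
-- On headers with no exact longitude key but some header containing 'lon', A's fallback
-- `if 'lon' in h or 'lng' in h and lon_key is None` (precedence bug) returns the LAST header
-- containing 'lon', while B returns the FIRST header containing 'lon' or 'lng' — the intended
-- first-match fallback, symmetric with the latitude fallback.
def lc (h : String) : List Char := h.toList.map Char.toLower
def dHasLon (h : String) : Bool := decide ("lon".toList <:+: lc h)
def D_find_coord_keys (header_row : List String) : Prop :=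
  (∀ h ∈ header_row, lc h ∉ ["lng", "lon", "longitude", "x", "lng_dd", "lon_deg"].map String.toList) ∧
    header_row.any dHasLon = true ∧ header_row.reverse.find? dHasLon ≠
      header_row.find? fun h => dHasLon h || decide ("lng".toList <:+: lc h)
instance (header_row : List String) : Decidable (D_find_coord_keys header_row) := by unfold D_find_coord_keys; infer_instance

def Spec_find_coord_keys (header_row : List String) (out : Option String × Option String) : Prop := ¬ D_find_coord_keys header_row → out = find_coord_keys_alt header_row
instance (header_row : List String) (out : Option String × Option String) : Decidable (Spec_find_coord_keys header_row out) := by unfold Spec_find_coord_keys; infer_instance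

def pvDiffWitness_find_coord_keys : List String := ["mylon", "lon2"]
def pvDiffWitnessOut_find_coord_keys : (Option String × Option String) × (Option String × Option String) :=
  ((none, some "lon2"), (none, some "mylon"))

-- ===== CLAIM (what is proved, stated in full; the proofs are below) =====
def Claim_unchanged_find_coord_keys : Prop := ∀ (header_row : List String), Dom_find_coord_keys header_row → Spec_find_coord_keys header_row (find_coord_keys header_row)
def Claim_changed_find_coord_keys : Prop := Dom_find_coord_keys (pvDiffWitness_find_coord_keys) ∧ D_find_coord_keys (pvDiffWitness_find_coord_keys) ∧ find_coord_keys (pvDiffWitness_find_coord_keys) = pvDiffWitnessOut_find_coord_keys.1 ∧ find_coord_keys_alt (pvDiffWitness_find_coord_keys) = pvDiffWitnessOut_find_coord_keys.2 ∧ pvDiffWitnessOut_find_coord_keys.1 ≠ pvDiffWitnessOut_find_coord_keys.2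
def Claim_exact_find_coord_keys : Prop := ∀ (header_row : List String), Dom_find_coord_keys header_row → D_find_coord_keys header_row → find_coord_keys header_row ≠ find_coord_keys_alt header_row

-- ===== LEMMAS AND PROOFS =====
-- predicates on an original header: exact/substring matches against its lowercased form
def pLatE (h : String) : Bool := LAT_KEYS.contains (PySem.Str.lower h)
def pLonE (h : String) : Bool := LON_KEYS.contains (PySem.Str.lower h)
def pLatS (h : String) : Bool := PySem.Str.isIn "lat" (PySem.Str.lower h)
def pLonL (h : String) : Bool := PySem.Str.isIn "lon" (PySem.Str.lower h)
def pLng  (h : String) : Bool := PySem.Str.isIn "lng" (PySem.Str.lower h)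
def pLonOr (h : String) : Bool := PySem.Str.isIn "lon" (PySem.Str.lower h) || PySem.Str.isIn "lng" (PySem.Str.lower h)

theorem toLower_eq (c : Char) : c.toLower = PySem.Chars.lowerChar c := by
  simp only [Char.toLower, PySem.Chars.lowerChar, PySem.Chars.isupper, ge_iff_le, Char.le_def,
    Bool.and_eq_true, decide_eq_true_iff]
  split_ifs with h1
  · have hb1 : 65 ≤ c.val.toNat := UInt32.le_iff_toNat_le.mp h1.1
    have hb2 : c.val.toNat ≤ 90 := UInt32.le_iff_toNat_le.mp h1.2
    have hcn : c.toNat = c.val.toNat := rfl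
    have hvalid : (c.toNat + 32).isValidChar := Or.inl (by omega)
    apply Char.ext
    show c.val + ('a'.val - 'A'.val) = (Char.ofNat (c.toNat + 32)).val
    unfold Char.ofNat
    rw [dif_pos hvalid]
    show c.val + 32 = _
    apply UInt32.toNat_inj.mp
    rw [UInt32.toNat_add]
    show (c.val.toNat + (32 : UInt32).toNat) % 2 ^ 32 = c.toNat + 32
    have h32 : (32 : UInt32).toNat = 32 := rfl
    rw [h32, hcn]
    omega
  · rfl

theorem lc_eq (h : String) : lc h = (PySem.Str.lower h).toList := by
  rw [PySem.Str.toList_lower]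
  simp [lc, PySem.Chars.lower, toLower_eq]

theorem isIn_eq_decide (sub l : List Char) : PySem.Chars.isIn sub l = decide (sub <:+: l) := by
  by_cases hc : sub <:+: l
  · simp [hc, (PySem.Chars.isIn_iff_infix sub l).mpr hc]
  · simp [hc, (PySem.Chars.isIn_eq_false_iff sub l).mpr hc]

theorem pLonE_iff (h : String) : pLonE h = true ↔
    lc h ∈ ["lng", "lon", "longitude", "x", "lng_dd", "lon_deg"].map String.toList := by
  have hm : lc h ∈ ["lng", "lon", "longitude", "x", "lng_dd", "lon_deg"].map String.toList
      ↔ PySem.Str.lower h ∈ (["lng", "lon", "longitude", "x", "lng_dd", "lon_deg"] : List String) := by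
    rw [lc_eq]
    constructor
    · intro hmem
      rcases List.mem_map.mp hmem with ⟨t, ht, he⟩
      rwa [← String.toList_inj.mp he]
    · intro hmem
      exact List.mem_map.mpr ⟨_, hmem, rfl⟩
  rw [hm]
  simp [pLonE, LON_KEYS]

theorem pLonL_eq_dHasLon : pLonL = dHasLon := by
  funext h
  simp [pLonL, dHasLon, lc_eq, PySem.Str.isIn, PySem.Str.toList_lower, isIn_eq_decide]

theorem pLonOr_eq_dLng : pLonOr = fun h => dHasLon h || decide ("lng".toList <:+: lc h) := by
  funext h
  rw [← pLonL_eq_dHasLon]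
  simp [pLonOr, pLonL, lc_eq, PySem.Str.isIn, PySem.Str.toList_lower, isIn_eq_decide]

-- hr.drop n = h :: t → pyGet? hr n = some h
theorem pyGet_of_drop (hr t : List String) (h : String) (n : Nat) (ht : hr.drop n = h :: t) :
    PySem.List.pyGet? hr (n : Int) = some h := by
  have h1 : hr[n]? = some h := by
    have : (hr.drop n)[0]? = hr[n + 0]? := List.getElem?_drop
    simpa [ht] using this.symm
  simp [PySem.List.pyGet?_natCast, h1]

theorem loop1_eq (hr : List String) :
    ∀ (t : List String) (n : Nat) (st : Option String × Option String), hr.drop n = t →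
    ((PySem.List.enumerate (t.map PySem.Str.lower) (n : Int)).foldl
      (fun (st : Option String × Option String) (p : Int × String) =>
        (if LAT_KEYS.contains p.2 && st.1.isNone then PySem.List.pyGet? hr p.1 else st.1,
         if LON_KEYS.contains p.2 && st.2.isNone then PySem.List.pyGet? hr p.1 else st.2)) st)
    = (st.1.or (t.find? pLatE), st.2.or (t.find? pLonE)) := by
  intro t
  induction t with
  | nil => intro n st _; simp
  | cons h t ih =>
    intro n st ht
    have hg : PySem.List.pyGet? hr (n : Int) = some h := pyGet_of_drop hr t h n ht
    have ht' : hr.drop (n + 1) = t := by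
      have : List.drop 1 (List.drop n hr) = List.drop (n + 1) hr := List.drop_drop
      rw [← this, ht, List.drop_one, List.tail_cons]
    rw [List.map_cons, PySem.List.enumerate_cons, List.foldl_cons]
    have := ih (n + 1) ((if LAT_KEYS.contains (PySem.Str.lower h) && st.1.isNone then PySem.List.pyGet? hr n else st.1,
         if LON_KEYS.contains (PySem.Str.lower h) && st.2.isNone then PySem.List.pyGet? hr n else st.2)) ht'
    push_cast at this ⊢
    rw [this]
    clear this ih
    cases hst : st.1 <;> cases hst2 : st.2 <;>
      simp [pLatE, pLonE, hg, List.find?_cons] <;> split_ifs <;> simp_all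

theorem loop2_eq (hr : List String) :
    ∀ (t : List String) (n : Nat) (st : Option String), hr.drop n = t →
    ((PySem.List.enumerate (t.map PySem.Str.lower) (n : Int)).foldl
      (fun (lat : Option String) (p : Int × String) =>
        if PySem.Str.isIn "lat" p.2 && lat.isNone then PySem.List.pyGet? hr p.1 else lat) st)
    = st.or (t.find? pLatS) := by
  intro t
  induction t with
  | nil => intro n st _; simp
  | cons h t ih =>
    intro n st ht
    have hg : PySem.List.pyGet? hr (n : Int) = some h := pyGet_of_drop hr t h n ht
    have ht' : hr.drop (n + 1) = t := by
      have : List.drop 1 (List.drop n hr) = List.drop (n + 1) hr := List.drop_drop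
      rw [← this, ht, List.drop_one, List.tail_cons]
    rw [List.map_cons, PySem.List.enumerate_cons, List.foldl_cons]
    have := ih (n + 1) (if PySem.Str.isIn "lat" (PySem.Str.lower h) && st.isNone then PySem.List.pyGet? hr n else st) ht'
    push_cast at this ⊢
    rw [this]
    cases hst : st <;> simp [pLatS, hg, List.find?_cons] <;> split_ifs <;> simp_all

theorem loop3_eq (hr : List String) :
    ∀ (t : List String) (n : Nat) (st : Option String), hr.drop n = t →
    ((PySem.List.enumerate (t.map PySem.Str.lower) (n : Int)).foldl
      (fun (lon : Option String) (p : Int × String) =>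
        if PySem.Str.isIn "lon" p.2 || (PySem.Str.isIn "lng" p.2 && lon.isNone) then
          PySem.List.pyGet? hr p.1 else lon) st)
    = (t.reverse.find? pLonL).or (st.or (t.find? pLng)) := by
  intro t
  induction t with
  | nil => intro n st _; simp
  | cons h t ih =>
    intro n st ht
    have hg : PySem.List.pyGet? hr (n : Int) = some h := pyGet_of_drop hr t h n ht
    have ht' : hr.drop (n + 1) = t := by
      have : List.drop 1 (List.drop n hr) = List.drop (n + 1) hr := List.drop_drop
      rw [← this, ht, List.drop_one, List.tail_cons]
    rw [List.map_cons, PySem.List.enumerate_cons, List.foldl_cons]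
    have := ih (n + 1) (if PySem.Str.isIn "lon" (PySem.Str.lower h) || (PySem.Str.isIn "lng" (PySem.Str.lower h) && st.isNone) then PySem.List.pyGet? hr n else st) ht'
    push_cast at this ⊢
    rw [this]
    rw [List.reverse_cons, List.find?_append]
    cases hlon : PySem.Str.isIn "lon" (PySem.Str.lower h) <;>
    cases hlng : PySem.Str.isIn "lng" (PySem.Str.lower h) <;>
    cases hst : st <;>
      simp_all [pLonL, pLng]

theorem loopB_eq :
    ∀ (t : List String) (st : Option String × Option String × Option String × Option String),
    (t.foldl
      (fun (st : Option String × Option String × Option String × Option String) (h : String) =>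
        (if st.1.isNone && LAT_KEYS.contains (PySem.Str.lower h) then some h else st.1,
         if st.2.1.isNone && PySem.Str.isIn "lat" (PySem.Str.lower h) then some h else st.2.1,
         if st.2.2.1.isNone && LON_KEYS.contains (PySem.Str.lower h) then some h else st.2.2.1,
         if st.2.2.2.isNone && (PySem.Str.isIn "lon" (PySem.Str.lower h) || PySem.Str.isIn "lng" (PySem.Str.lower h)) then some h else st.2.2.2)) st)
    = (st.1.or (t.find? pLatE), st.2.1.or (t.find? pLatS), st.2.2.1.or (t.find? pLonE),
       st.2.2.2.or (t.find? pLonOr)) := by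
  intro t
  induction t with
  | nil => intro st; simp
  | cons h t ih =>
    intro st
    rw [List.foldl_cons, ih]
    refine Prod.ext ?_ (Prod.ext ?_ (Prod.ext ?_ ?_))
    · cases hst : st.1 <;> simp [pLatE, List.find?_cons] <;> split_ifs <;> simp_all
    · cases hst : st.2.1 <;> simp [pLatS, List.find?_cons] <;> split_ifs <;> simp_all
    · cases hst : st.2.2.1 <;> simp [pLonE, List.find?_cons] <;> split_ifs <;> simp_all
    · cases hst : st.2.2.2 <;> simp [pLonOr, List.find?_cons] <;> split_ifs with hc <;>
        first
          | (simp_all; done)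
          | (rcases hc with h' | h' <;> simp_all)

theorem A_char (hr : List String) : find_coord_keys hr
    = ((hr.find? pLatE).or (hr.find? pLatS),
       (hr.find? pLonE).or ((hr.reverse.find? pLonL).or (hr.find? pLng))) := by
  have h1 := loop1_eq hr hr 0 (none, none) rfl
  have h2 := fun st => loop2_eq hr hr 0 st rfl
  have h3 := fun st => loop3_eq hr hr 0 st rfl
  simp only [Nat.cast_zero] at h1 h2 h3
  simp only [find_coord_keys]
  rw [h1]
  simp only [h2, h3]
  cases hE : hr.find? pLatE <;> cases hoE : hr.find? pLonE <;> simp [Option.or]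

theorem B_char (hr : List String) : find_coord_keys_alt hr
    = ((hr.find? pLatE).or (hr.find? pLatS), (hr.find? pLonE).or (hr.find? pLonOr)) := by
  simp only [find_coord_keys_alt]
  rw [loopB_eq hr (none, none, none, none)]
  cases hE : hr.find? pLatE <;> cases hoE : hr.find? pLonE <;> simp [Option.or]

theorem find?_or_of_all_not (t : List String) (hall : ∀ h ∈ t, pLonL h = false) :
    t.find? pLonOr = t.find? pLng := by
  induction t with
  | nil => rfl
  | cons h t ih =>
    have hh := hall h (by simp)
    simp only [List.find?_cons]
    have : pLonOr h = pLng h := by simp [pLonOr, pLng, pLonL] at hh ⊢; simp [hh]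
    rw [this]
    cases pLng h
    · exact ih (fun x hx => hall x (by simp [hx]))
    · rfl

theorem lon_parts (hr : List String) (hE : hr.find? pLonE = none) (hD : ¬ D_find_coord_keys hr) :
    (hr.reverse.find? pLonL).or (hr.find? pLng) = hr.find? pLonOr := by
  have hall : ∀ h ∈ hr, lc h ∉ ["lng", "lon", "longitude", "x", "lng_dd", "lon_deg"].map String.toList := by
    intro h hh hmem
    exact List.find?_eq_none.mp hE h hh ((pLonE_iff h).mpr hmem)
  by_cases hany : hr.any dHasLon = true
  · have hne : hr.reverse.find? pLonL = hr.find? pLonOr := by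
      by_contra hcon
      exact hD ⟨hall, hany, by rw [← pLonOr_eq_dLng, ← pLonL_eq_dHasLon]; exact hcon⟩
    have hsome : (hr.reverse.find? pLonL).isSome := by
      rcases List.any_eq_true.mp hany with ⟨x, hx, hpx⟩
      apply List.find?_isSome.mpr
      exact ⟨x, List.mem_reverse.mpr hx, by rw [pLonL_eq_dHasLon]; exact hpx⟩
    rcases Option.isSome_iff_exists.mp hsome with ⟨v, hv⟩
    rw [hv] at hne ⊢
    simp [Option.or, ← hne]
  · have hnolon : ∀ h ∈ hr, pLonL h = false := by
      intro h hh
      have := fun hc => hany (List.any_eq_true.mpr ⟨h, hh, by rw [← pLonL_eq_dHasLon]; exact hc⟩)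
      cases hc : pLonL h
      · rfl
      · exact absurd hc this
    have hrev : hr.reverse.find? pLonL = none := by
      apply List.find?_eq_none.mpr
      intro x hx
      simp [hnolon x (List.mem_reverse.mp hx)]
    rw [hrev, find?_or_of_all_not hr hnolon]
    simp [Option.or]

-- ===== VERDICT (by name: the statement is the Claim_ definition above) =====
theorem find_coord_keys_spec : Claim_unchanged_find_coord_keys := by
  intro hr _
  intro hD
  rw [A_char, B_char]
  cases hE : hr.find? pLonE
  · rw [lon_parts hr hE hD]
  · simp [Option.or]

theorem find_coord_keys_changed : Claim_changed_find_coord_keys := by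
  unfold Claim_changed_find_coord_keys; decide

theorem find_coord_keys_tight : Claim_exact_find_coord_keys := by
  intro hr _ hD
  rcases hD with ⟨hall, hany, hne⟩
  rw [A_char, B_char]
  intro hcon
  have hE : hr.find? pLonE = none := by
    apply List.find?_eq_none.mpr
    intro x hx hpx
    exact hall x hx ((pLonE_iff x).mp hpx)
  have h2 := congrArg Prod.snd hcon
  simp only [hE, Option.or] at h2
  have hsome : (hr.reverse.find? pLonL).isSome := by
    rcases List.any_eq_true.mp hany with ⟨x, hx, hpx⟩
    apply List.find?_isSome.mpr
    exact ⟨x, List.mem_reverse.mpr hx, by rw [pLonL_eq_dHasLon]; exact hpx⟩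
  rcases Option.isSome_iff_exists.mp hsome with ⟨v, hv⟩
  rw [hv] at h2
  simp at h2
  apply hne
  rw [← pLonOr_eq_dLng, ← pLonL_eq_dHasLon, hv, ← h2]
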